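-- pv_equiv track=rewrite | github.com/mattsturg/AdventOfCode2021 | day04.py | search_rows
-- ===== SOURCE A (Python) =====
-- from typing import List
--
-- def row_check(current_board: List, small_mark_list: List):
--     for row in current_board:
--         whole_row_marked = True
--         for number in row:
--             found = False
--             for mark in small_mark_list:
--                 if mark == number:
--                     found = True
--             if not found:
--                 whole_row_marked = False
--         if whole_row_marked:
--             return True
--     return False
--
-- def search_rows(current_board: List, list_of_marks: List):
--     small_mark_list = []
--     count = 1
--     for mark in list_of_marks:
--         small_mark_list.append(mark)
--         found = row_check(current_board, small_mark_list)
--         if found: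
--             return count
--         count += 1
--     return count
-- ===== SOURCE B (Python) =====
-- def search_rows(current_board, list_of_marks):
--     # For each cell, the 1-based step at which it is first marked (inf if never);
--     # a row completes at the max of its cells' steps; answer = earliest row, clamped to [1, inf].
--     inf = len(list_of_marks) + 1
--     best = inf
--     for row in current_board:
--         step = 0
--         for v in row:
--             try:
--                 s = list_of_marks.index(v) + 1
--             except ValueError:
--                 s = inf
--             if s > step:
--                 step = s
--         if step < best:
--             best = step
--     return max(best, 1) if best < inf else inf
-- ===== Notes on version B (the rewrite author's own statement) =====
-- stated objective: faster
-- what changed: Replaces A's replay loop (re-checking every board row against each growing prefix of marks) by a single pass that computes, per row, the first-mark step of each cell (first index in list_of_marks) and takes min over rows of the max over cells.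
import Mathlib
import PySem

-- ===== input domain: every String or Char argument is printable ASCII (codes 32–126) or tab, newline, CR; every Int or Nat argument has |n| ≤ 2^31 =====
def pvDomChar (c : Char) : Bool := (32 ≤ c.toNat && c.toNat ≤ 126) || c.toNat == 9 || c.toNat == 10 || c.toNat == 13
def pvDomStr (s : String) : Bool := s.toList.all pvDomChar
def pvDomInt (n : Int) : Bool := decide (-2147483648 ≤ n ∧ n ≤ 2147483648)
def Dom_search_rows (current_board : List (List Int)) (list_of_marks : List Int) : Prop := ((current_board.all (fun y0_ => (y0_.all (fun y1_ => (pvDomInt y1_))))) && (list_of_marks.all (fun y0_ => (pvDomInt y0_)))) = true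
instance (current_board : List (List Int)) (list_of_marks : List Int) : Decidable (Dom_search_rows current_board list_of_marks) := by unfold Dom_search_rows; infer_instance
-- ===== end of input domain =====

-- B replaces A's replay loop (re-checking the whole board against each growing prefix of
-- the marks) by one pass computing, per row, the max over cells of each cell's first-mark
-- step, and taking the earliest row; objective: faster.

-- ===== PORT A =====
-- 'for row in current_board: … if whole_row_marked: return True' (early return → recursion)
def rowCheckGo (small_mark_list : List Int) : List (List Int) → Bool
  | [] => false
  | row :: rest =>
    let whole_row_marked := row.foldl (fun w number =>
      let found := small_mark_list.foldl (fun f mark => if mark = number then true else f) false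
      if !found then false else w) true
    if whole_row_marked then true else rowCheckGo small_mark_list rest

def row_check (current_board : List (List Int)) (small_mark_list : List Int) : Bool :=
  rowCheckGo small_mark_list current_board

-- 'for mark in list_of_marks: append; if row_check: return count; count += 1' (early return → recursion)
def searchGo (current_board : List (List Int)) : List Int → List Int → Int → Int
  | [], _small_mark_list, count => count
  | mark :: rest, small_mark_list, count =>
    let small' := small_mark_list ++ [mark]
    if row_check current_board small' then count
    else searchGo current_board rest small' (count + 1)

def search_rows (current_board : List (List Int)) (list_of_marks : List Int) : Int :=
  searchGo current_board list_of_marks [] 1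

-- ===== PORT B =====
-- step of one cell: 1-based index of its first occurrence in the marks, inf if absent
def stepOfCell (list_of_marks : List Int) (inf : Int) (v : Int) : Int :=
  match PySem.List.index? list_of_marks v with
  | some i => (i : Int) + 1
  | none => inf

def search_rows_alt (current_board : List (List Int)) (list_of_marks : List Int) : Int :=
  let inf : Int := (list_of_marks.length : Int) + 1
  let best := current_board.foldl (fun best row =>
    let step := row.foldl (fun step v =>
      let s := stepOfCell list_of_marks inf v
      if s > step then s else step) 0
    if step < best then step else best) inf
  if best < inf then max best 1 else inf

-- ===== PRECONDITION & SPEC =====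
def Spec_search_rows (current_board : List (List Int)) (list_of_marks : List Int) (out : Int) : Prop := out = search_rows_alt current_board list_of_marks
instance (current_board : List (List Int)) (list_of_marks : List Int) (out : Int) : Decidable (Spec_search_rows current_board list_of_marks out) := by unfold Spec_search_rows; infer_instance

-- ===== CLAIM (what is proved, stated in full; the proofs are below) =====
def Claim_equal_search_rows : Prop := ∀ (current_board : List (List Int)) (list_of_marks : List Int), Dom_search_rows current_board list_of_marks → Spec_search_rows current_board list_of_marks (search_rows current_board list_of_marks)

-- ===== LEMMAS AND PROOFS =====

-- abbreviations for the two folds of B (proof-side only)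
def rowStep (marks : List Int) (inf : Int) (a : Int) (row : List Int) : Int :=
  row.foldl (fun step v =>
    let s := stepOfCell marks inf v
    if s > step then s else step) a

def bestFold (marks : List Int) (inf : Int) (a : Int) (board : List (List Int)) : Int :=
  board.foldl (fun best row =>
    let step := rowStep marks inf 0 row
    if step < best then step else best) a

lemma found_fold (sml : List Int) (number : Int) (f : Bool) :
    sml.foldl (fun f mark => if mark = number then true else f) f
      = (f || decide (number ∈ sml)) := by
  induction sml generalizing f with
  | nil => simp
  | cons x xs ih =>
    simp only [List.foldl_cons, ih, List.mem_cons]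
    by_cases h : x = number
    · simp [h]
    · have h2 : ¬ number = x := fun hh => h hh.symm
      simp [h, h2]

lemma whole_fold (row sml : List Int) (acc : Bool) :
    row.foldl (fun w number =>
      let found := sml.foldl (fun f mark => if mark = number then true else f) false
      if !found then false else w) acc
      = (acc && row.all (fun v => decide (v ∈ sml))) := by
  induction row generalizing acc with
  | nil => simp
  | cons x xs ih =>
    rw [List.foldl_cons, ih]
    show ((if !(List.foldl _ false sml) then false else acc) && _) = _
    rw [found_fold]
    by_cases h : x ∈ sml <;> simp [h]

lemma rowCheck_iff (board : List (List Int)) (sml : List Int) :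
    row_check board sml = true ↔ ∃ row ∈ board, ∀ v ∈ row, v ∈ sml := by
  induction board with
  | nil => simp [row_check, rowCheckGo]
  | cons r rest ih =>
    show rowCheckGo sml (r :: rest) = true ↔ _
    rw [rowCheckGo]
    show (if (List.foldl _ true r) then true else rowCheckGo sml rest) = true ↔ _
    rw [whole_fold, Bool.true_and]
    by_cases h : (r.all fun v => decide (v ∈ sml)) = true
    · have hall : ∀ v ∈ r, v ∈ sml := by simpa using h
      simp only [h, if_true, true_iff]
      exact ⟨r, by simp, hall⟩
    · rw [if_neg h]
      rw [show rowCheckGo sml rest = row_check rest sml from rfl, ih]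
      constructor
      · rintro ⟨row, hm, hall⟩; exact ⟨row, List.mem_cons_of_mem _ hm, hall⟩
      · rintro ⟨row, hm, hall⟩
        rcases List.mem_cons.mp hm with rfl | hm'
        · exact absurd (by simpa using hall) h
        · exact ⟨row, hm', hall⟩

lemma rowStep_le_iff (marks : List Int) (inf : Int) (row : List Int) (a c : Int) :
    rowStep marks inf a row ≤ c ↔ a ≤ c ∧ ∀ v ∈ row, stepOfCell marks inf v ≤ c := by
  induction row generalizing a with
  | nil => simp [rowStep]
  | cons x xs ih =>
    show rowStep marks inf (if stepOfCell marks inf x > a then stepOfCell marks inf x else a) xs ≤ c ↔ _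
    rw [ih]
    constructor
    · rintro ⟨h1, h2⟩
      split_ifs at h1 with hx
      · exact ⟨by omega, by
          intro v hv; rcases List.mem_cons.mp hv with rfl | hv'
          · exact h1
          · exact h2 v hv'⟩
      · exact ⟨h1, by
          intro v hv; rcases List.mem_cons.mp hv with rfl | hv'
          · omega
          · exact h2 v hv'⟩
    · rintro ⟨h1, h2⟩
      have hx := h2 x (by simp)
      refine ⟨?_, fun v hv => h2 v (List.mem_cons_of_mem _ hv)⟩
      split_ifs <;> omega

lemma rowStep_nonneg (marks : List Int) (inf : Int) (row : List Int) (a : Int)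
    (ha : 0 ≤ a) : 0 ≤ rowStep marks inf a row := by
  induction row generalizing a with
  | nil => simpa [rowStep]
  | cons x xs ih =>
    show 0 ≤ rowStep marks inf (if stepOfCell marks inf x > a then stepOfCell marks inf x else a) xs
    apply ih; split_ifs <;> omega

lemma bestFold_le_iff (marks : List Int) (inf : Int) (board : List (List Int)) (a c : Int) :
    bestFold marks inf a board ≤ c ↔ a ≤ c ∨ ∃ row ∈ board, rowStep marks inf 0 row ≤ c := by
  induction board generalizing a with
  | nil => simp [bestFold]
  | cons r rest ih =>
    show bestFold marks inf (if rowStep marks inf 0 r < a then rowStep marks inf 0 r else a) rest ≤ c ↔ _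
    rw [ih]
    constructor
    · rintro (h | ⟨row, hm, hs⟩)
      · split_ifs at h with hr
        · exact Or.inr ⟨r, by simp, h⟩
        · exact Or.inl h
      · exact Or.inr ⟨row, List.mem_cons_of_mem _ hm, hs⟩
    · rintro (h | ⟨row, hm, hs⟩)
      · exact Or.inl (by split_ifs <;> omega)
      · rcases List.mem_cons.mp hm with rfl | hm'
        · exact Or.inl (by split_ifs <;> omega)
        · exact Or.inr ⟨row, hm', hs⟩

lemma bestFold_nonneg (marks : List Int) (inf : Int) (board : List (List Int)) (a : Int)
    (ha : 0 ≤ a) : 0 ≤ bestFold marks inf a board := by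
  induction board generalizing a with
  | nil => simpa [bestFold]
  | cons r rest ih =>
    show 0 ≤ bestFold marks inf (if rowStep marks inf 0 r < a then rowStep marks inf 0 r else a) rest
    apply ih
    have := rowStep_nonneg marks inf r 0 le_rfl
    split_ifs <;> omega

lemma stepOfCell_eq_some (marks : List Int) (inf : Int) (v : Int) (i : Nat)
    (h : PySem.List.index? marks v = some i) : stepOfCell marks inf v = (i : Int) + 1 := by
  unfold stepOfCell; rw [h]

lemma stepOfCell_eq_none (marks : List Int) (inf : Int) (v : Int)
    (h : PySem.List.index? marks v = none) : stepOfCell marks inf v = inf := by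
  unfold stepOfCell; rw [h]

-- a cell is marked within the first c marks iff its first-occurrence step is ≤ c
lemma cellStep_iff (marks : List Int) (v : Int) (c : Nat) (hc : c ≤ marks.length) :
    stepOfCell marks ((marks.length : Int) + 1) v ≤ (c : Int) ↔ v ∈ marks.take c := by
  cases hidx : PySem.List.index? marks v with
  | none =>
    rw [stepOfCell_eq_none marks _ v hidx]
    have hnm : v ∉ marks := (PySem.List.index?_eq_none_iff marks v).mp hidx
    constructor
    · intro h; omega
    · intro h; exact absurd (List.mem_of_mem_take h) hnm
  | some i =>
    rw [stepOfCell_eq_some marks _ v i hidx]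
    obtain ⟨hi, hvi, hmin⟩ := PySem.List.getElem_of_index?_eq_some hidx
    constructor
    · intro h
      have hic : i < c := by omega
      have hlen : i < (marks.take c).length := by simp; omega
      have : (marks.take c)[i] = v := by
        rw [List.getElem_take]; exact hvi
      exact this ▸ List.getElem_mem hlen
    · intro h
      obtain ⟨j, hj, hvj⟩ := List.getElem_of_mem h
      have hjc : j < c := by simp at hj; omega
      have hjl : j < marks.length := by simp at hj; omega
      have hvj' : marks[j] = v := by rw [List.getElem_take] at hvj; exact hvj
      by_contra hlt
      have hji : j < i := by omega
      exact hmin j hji hvj'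

def bestVal (board : List (List Int)) (marks : List Int) : Int :=
  bestFold marks ((marks.length : Int) + 1) ((marks.length : Int) + 1) board

-- the board has a fully-marked row after the first c marks iff bestVal ≤ c
lemma key_iff (board : List (List Int)) (marks : List Int) (c : Nat) (hc : c ≤ marks.length) :
    row_check board (marks.take c) = true ↔ bestVal board marks ≤ (c : Int) := by
  rw [rowCheck_iff, bestVal, bestFold_le_iff]
  have hninf : ¬ ((marks.length : Int) + 1 ≤ (c : Int)) := by omega
  simp only [hninf, false_or]
  constructor
  · rintro ⟨row, hm, hall⟩
    refine ⟨row, hm, (rowStep_le_iff _ _ _ _ _).mpr ⟨by omega, fun v hv => ?_⟩⟩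
    exact (cellStep_iff marks v c hc).mpr (hall v hv)
  · rintro ⟨row, hm, hs⟩
    obtain ⟨-, hall⟩ := (rowStep_le_iff _ _ _ _ _).mp hs
    exact ⟨row, hm, fun v hv => (cellStep_iff marks v c hc).mp (hall v hv)⟩

lemma bestVal_le_inf (board : List (List Int)) (marks : List Int) :
    bestVal board marks ≤ (marks.length : Int) + 1 := by
  rw [bestVal, bestFold_le_iff]; exact Or.inl le_rfl

lemma bestVal_nonneg (board : List (List Int)) (marks : List Int) :
    0 ≤ bestVal board marks := bestFold_nonneg _ _ _ _ (by positivity)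

def result (board : List (List Int)) (marks : List Int) : Int :=
  if bestVal board marks < (marks.length : Int) + 1 then max (bestVal board marks) 1
  else (marks.length : Int) + 1

lemma searchGo_loop (board : List (List Int)) (marks : List Int) :
    ∀ (m k : Nat), k + m = marks.length →
      (∀ j : Nat, 1 ≤ j → j ≤ k → ¬ (bestVal board marks ≤ (j : Int))) →
      searchGo board (marks.drop k) (marks.take k) ((k : Int) + 1) = result board marks := by
  intro m
  induction m with
  | zero =>
    intro k hk hj
    have hkn : k = marks.length := by omega
    subst hkn
    simp only [List.drop_length, searchGo]
    have hb0 := bestVal_nonneg board marks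
    have hbi := bestVal_le_inf board marks
    unfold result
    split_ifs with h
    · by_cases hn : marks.length = 0
      · have hz : bestVal board marks = 0 := by rw [hn] at h; push_cast at h; omega
        rw [hz, hn]; norm_num
      · exfalso
        exact hj marks.length (by omega) le_rfl (by omega)
    · omega
  | succ m ih =>
    intro k hk hj
    have hklt : k < marks.length := by omega
    rw [List.drop_eq_getElem_cons hklt]
    rw [searchGo]
    have htake : marks.take k ++ [marks[k]] = marks.take (k + 1) := by
      rw [List.take_add_one, List.getElem?_eq_getElem hklt]; rfl
    rw [htake]
    by_cases hrc : row_check board (marks.take (k + 1)) = true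
    · rw [if_pos hrc]
      have hble : bestVal board marks ≤ ((k : Int) + 1) := by
        have := (key_iff board marks (k + 1) (by omega)).mp hrc
        push_cast at this ⊢; omega
      unfold result
      have hlt : bestVal board marks < (marks.length : Int) + 1 := by omega
      rw [if_pos hlt]
      by_cases hk0 : k = 0
      · subst hk0
        have := bestVal_nonneg board marks
        simp only [Nat.cast_zero, zero_add] at hble ⊢
        omega
      · have := hj k (by omega) le_rfl
        omega
    · rw [if_neg hrc]
      have hstep : searchGo board (marks.drop (k+1)) (marks.take (k+1)) (((k+1 : Nat) : Int) + 1)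
          = result board marks := by
        apply ih (k+1) (by omega)
        intro j h1 h2
        by_cases hjk : j ≤ k
        · exact hj j h1 hjk
        · have hj1 : j = k + 1 := by omega
          subst hj1
          intro hle
          exact hrc ((key_iff board marks (k+1) (by omega)).mpr (by push_cast at hle ⊢; omega))
      have hcast : ((k + 1 : Nat) : Int) + 1 = ((k : Int) + 1) + 1 := by push_cast; ring
      rw [hcast] at hstep
      exact hstep

lemma alt_eq_result (board : List (List Int)) (marks : List Int) :
    search_rows_alt board marks = result board marks := by
  unfold search_rows_alt result bestVal bestFold rowStep
  rfl

-- ===== VERDICT (by name: the statement is the Claim_ definition above) =====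
theorem search_rows_spec : Claim_equal_search_rows := by
  intro board marks _
  unfold Spec_search_rows
  rw [alt_eq_result]
  have h := searchGo_loop board marks marks.length 0 (by omega)
    (by intro j h1 h2; omega)
  simpa [search_rows] using h
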